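-- pv_equiv track=rewrite | github.com/dhsong95/-PRACTICE-Programmers-Algorithm | level 2/라면공장.py | solution
-- ===== SOURCE A (Python) =====
-- import heapq
--
-- def solution(stock, dates, supplies, k):
--     # 최대 힙을 위한 힙
--     heap = list()
--
--     # 인덱스: 현재 재고량으로 버틸 수 있는 일수를 가리킨다
--     idx = 0
--
--     # 공급 횟수 카운터
--     counter = 0
--
--     # 현재 재고량으로 목표치를 버틸 수 없는 경우
--     while stock < k:
--         # 현재 재고량으로 버틸 수 있는 일수의 공급량을 모두 힙에 저장
--         # 최대 힙으로 구현해야하므로 -1 이 곱해진다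
--         while idx < len(dates) and dates[idx] <= stock:
--             heapq.heappush(heap, -supplies[idx])
--             idx += 1
--
--         # -1이 곱해져서 원래의 공급량으로 복원
--         supply = -1 * heapq.heappop(heap)
--
--         # 재고량에 공급량 반영
--         stock += supply
--
--         # 공급 횟수 증가
--         counter += 1
--
--     return counter
-- ===== SOURCE B (Python) =====
-- def solution(stock, dates, supplies, k):
--     # one queue of (date, supply) pairs consumed from the front; no heap, no index pointer
--     pending = list(zip(dates, supplies))
--     avail = []
--     counter = 0
--     while stock < k:
--         taken = []
--         while pending and pending[0][0] <= stock:
--             taken.append(pending.pop(0)[1])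
--         avail = avail + taken
--         best = max(avail)
--         avail.remove(best)
--         stock += best
--         counter += 1
--     return counter
-- ===== Notes on version B (the rewrite author's own statement) =====
-- stated objective: simpler
-- what changed: Replaces the heapq max-heap of negated supplies and the idx pointer into two parallel lists by a single zipped (date,supply) queue consumed from the front plus a plain list from which each step takes max() and removes it; Pre_ excludes the inputs on which A raises (stock cannot reach k, or a supplies list shorter than dates is indexed) and, with it, the rare mismatched-length inputs whose unlock closure reaches a missing supply even though A happens to stop early at k and return.
-- outside the precondition, e.g. on solution(2, [-3, -4, 3, -3, 2, 8], [-5, 8], 5): A returns 1, B returns 1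
import Mathlib
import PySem

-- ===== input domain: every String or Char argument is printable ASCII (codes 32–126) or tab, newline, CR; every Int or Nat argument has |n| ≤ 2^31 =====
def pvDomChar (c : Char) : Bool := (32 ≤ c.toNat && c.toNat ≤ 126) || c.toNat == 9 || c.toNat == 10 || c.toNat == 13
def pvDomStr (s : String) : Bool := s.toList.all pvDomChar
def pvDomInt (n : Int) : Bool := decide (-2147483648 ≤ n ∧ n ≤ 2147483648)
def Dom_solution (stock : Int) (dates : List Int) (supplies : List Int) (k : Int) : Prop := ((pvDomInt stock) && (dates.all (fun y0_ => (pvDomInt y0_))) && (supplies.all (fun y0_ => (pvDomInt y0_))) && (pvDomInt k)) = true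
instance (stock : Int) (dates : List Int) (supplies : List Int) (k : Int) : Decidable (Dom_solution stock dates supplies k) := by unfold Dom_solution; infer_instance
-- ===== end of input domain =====

-- B replaces A's heapq max-heap of negated supplies and its idx pointer by a single zipped
-- (date,supply) queue plus a plain list scanned with max/remove (simpler, not faster).
-- ===== PORT A =====
-- inner `while idx < len(dates) and dates[idx] <= stock`: the consumed prefix plays the role of idx;
-- heapq is ported as an ascending-sorted list (heappush = ordered insert, heappop = head = minimum),
-- which returns exactly the values heapq returns. The `(d :: ds, [], _)` case where d ≤ stock is
-- Python's IndexError on supplies[idx] (excluded by Pre_); the port returns the current state there.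
def pushA (stock : Int) : List Int → List Int → List Int → List Int × List Int × List Int
  | [], ss, heap => ([], ss, heap)
  | d :: ds, [], heap => (d :: ds, [], heap)
  | d :: ds, s :: ss, heap =>
    if d ≤ stock then pushA stock ds ss (List.orderedInsert (· ≤ ·) (-s) heap)
    else (d :: ds, s :: ss, heap)

-- outer `while stock < k`; each iteration pops one of at most dates.length pushed elements, so the
-- loop body runs at most dates.length + 1 times on inputs where Python returns (fuel is only a
-- totality guard; an empty heap at the pop is Python's IndexError, excluded by Pre_).
def loopA (k : Int) : Nat → Int → List Int → List Int → List Int → Int → Int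
  | 0, _, _, _, _, counter => counter
  | fuel + 1, stock, ds, ss, heap, counter =>
    if stock < k then
      match pushA stock ds ss heap with
      | (ds', ss', heap') =>
        match heap' with
        | [] => counter
        | h :: t => loopA k fuel (stock + (-1) * h) ds' ss' t (counter + 1)
    else counter

def solution (stock : Int) (dates : List Int) (supplies : List Int) (k : Int) : Int :=
  loopA k (dates.length + 1) stock dates supplies [] 0

-- ===== PORT B =====
-- inner `while pending and pending[0][0] <= stock: taken.append(pending.pop(0)[1])` of Source B:
-- splits the unlocked front of the queue off, returning (taken supplies, remaining queue)
def splitUnlocked (stock : Int) : List (Int × Int) → List Int × List (Int × Int)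
  | [] => ([], [])
  | p :: ps =>
    if p.1 ≤ stock then
      ((splitUnlocked stock ps).1.cons p.2, (splitUnlocked stock ps).2)
    else ([], p :: ps)

-- outer while of Source B: best = max(avail); avail.remove(best); stock += best
-- (max() on an empty avail is Python's ValueError, excluded by Pre_; the port returns counter there)
def loopB (k : Int) : Nat → Int → List (Int × Int) → List Int → Int → Int
  | 0, _, _, _, counter => counter
  | fuel + 1, stock, pending, avail, counter =>
    if stock < k then
      match (avail ++ (splitUnlocked stock pending).1) with
      | avail' =>
        match PySem.List.max? avail' (fun x => x) with
        | none => counter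
        | some best =>
          match PySem.List.remove? avail' best with
          | none => counter
          | some avail'' =>
            loopB k fuel (stock + best) (splitUnlocked stock pending).2 avail'' (counter + 1)
    else counter

def solution_alt (stock : Int) (dates : List Int) (supplies : List Int) (k : Int) : Int :=
  loopB k (dates.length + 1) stock (dates.zip supplies) [] 0

-- ===== PRECONDITION & SPEC =====
-- Closed-form reach value: scanning the date/supply pairs in order, advance past a pair while its
-- date is at most the running total (initial stock plus the nonnegative supplies passed so far);
-- the result is the largest stock the run can ever attain. `none` marks a passed date with no
-- matching supply (Python's IndexError on supplies[idx]).
def reachStock (stock : Int) : List Int → List Int → Option Int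
  | [], _ => some stock
  | d :: ds, ss =>
    if d ≤ stock then
      match ss with
      | [] => none
      | s :: ss' => reachStock (stock + max s 0) ds ss'
    else some stock

def preCheck (stock : Int) (dates : List Int) (supplies : List Int) (k : Int) : Bool :=
  match reachStock stock dates supplies with
  | none => false
  | some t => decide (k ≤ t)

-- Pre_ excludes exactly the inputs where A raises (the reach value never attains k, or an unlocked
-- index has no supply) and, with the latter, a few mismatched-length inputs whose closure reaches a
-- missing supply even though A happens to stop early at k and return.
def Pre_solution (stock : Int) (dates : List Int) (supplies : List Int) (k : Int) : Prop :=
  k ≤ stock ∨ preCheck stock dates supplies k = true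
instance (stock : Int) (dates : List Int) (supplies : List Int) (k : Int) : Decidable (Pre_solution stock dates supplies k) := by unfold Pre_solution; infer_instance

def pvWitness_solution : Int × List Int × List Int × Int := (0, [0], [5], 5)

def Spec_solution (stock : Int) (dates : List Int) (supplies : List Int) (k : Int) (out : Int) : Prop := out = solution_alt stock dates supplies k
instance (stock : Int) (dates : List Int) (supplies : List Int) (k : Int) (out : Int) : Decidable (Spec_solution stock dates supplies k out) := by unfold Spec_solution; infer_instance

-- ===== CLAIM (what is proved, stated in full; the proofs are below) =====
def Claim_equal_solution : Prop := ∀ (stock : Int) (dates : List Int) (supplies : List Int) (k : Int), Dom_solution stock dates supplies k → Pre_solution stock dates supplies k → Spec_solution stock dates supplies k (solution stock dates supplies k)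

-- ===== LEMMAS AND PROOFS =====

-- The inner passes of the two ports walk the same pairs: A's remaining (ds, ss) zipped equals B's
-- remaining queue, A's heap stays sorted, and B's avail (once the taken supplies are appended) is a
-- permutation of A's heap with the signs flipped.
lemma push_split_rel (stock : Int) :
    ∀ (ds ss heap avail : List Int),
      heap.Pairwise (· ≤ ·) → avail.Perm (heap.map (fun x => -x)) →
      (pushA stock ds ss heap).1.zip (pushA stock ds ss heap).2.1
        = (splitUnlocked stock (ds.zip ss)).2 ∧
      (pushA stock ds ss heap).2.2.Pairwise (· ≤ ·) ∧
      (avail ++ (splitUnlocked stock (ds.zip ss)).1).Perm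
        ((pushA stock ds ss heap).2.2.map (fun x => -x)) := by
  intro ds
  induction ds with
  | nil => intro ss heap avail hs hp; simpa [pushA, splitUnlocked] using ⟨hs, hp⟩
  | cons d ds ih =>
    intro ss heap avail hs hp
    cases ss with
    | nil => simpa [pushA, splitUnlocked] using ⟨hs, hp⟩
    | cons s ss =>
      by_cases hd : d ≤ stock
      · simp only [pushA, splitUnlocked, List.zip_cons_cons, if_pos hd]
        have hperm : (avail ++ [s]).Perm
            ((List.orderedInsert (· ≤ ·) (-s) heap).map (fun x => -x)) := by
          have p1 : (avail ++ [s]).Perm (s :: avail) := List.perm_append_singleton s avail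
          have p2 : (s :: avail).Perm (s :: heap.map (fun x => -x)) := hp.cons s
          have p3 : (s :: heap.map (fun x => -x)) = ((-s :: heap).map (fun x => -x)) := by simp
          have p4 : ((-s :: heap).map (fun x => -x)).Perm
              ((List.orderedInsert (· ≤ ·) (-s) heap).map (fun x => -x)) :=
            ((List.perm_orderedInsert (· ≤ ·) (-s) heap).map (fun x => -x)).symm
          exact ((p1.trans p2).trans (p3 ▸ List.Perm.refl _)).trans p4
        obtain ⟨h1, h2, h3⟩ := ih ss (List.orderedInsert (· ≤ ·) (-s) heap) (avail ++ [s])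
          (List.Pairwise.orderedInsert (-s) heap hs) hperm
        refine ⟨h1, h2, ?_⟩
        have : avail ++ s :: (splitUnlocked stock (ds.zip ss)).1
            = (avail ++ [s]) ++ (splitUnlocked stock (ds.zip ss)).1 := by simp
        simpa [List.cons] using this ▸ h3
      · simp only [pushA, splitUnlocked, List.zip_cons_cons, if_neg hd]
        simpa using ⟨hs, hp⟩

-- One pop step: on an ascending heap, the negation of its head is the maximum of avail.
lemma max_of_perm_neg (h : Int) (t avail : List Int)
    (hs : (h :: t).Pairwise (· ≤ ·)) (hp : avail.Perm ((h :: t).map (fun x => -x))) :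
    PySem.List.max? avail (fun x => x) = some (-h) := by
  have hne : avail ≠ [] := by
    intro he
    have := hp.length_eq
    simp [he] at this
  cases hm : PySem.List.max? avail (fun x => x) with
  | none => exact absurd ((PySem.List.max?_eq_none_iff avail (fun x => x)).mp hm) hne
  | some m =>
    have hmem : m ∈ avail := PySem.List.max?_mem hm
    have hmax : ∀ y ∈ avail, y ≤ m := fun y hy => PySem.List.max?_isMax hm y hy
    have hhm : -h ∈ avail := hp.mem_iff.mpr (by simp)
    have h1 : m ≤ -h := by
      obtain ⟨x, hx, hxm⟩ := List.mem_map.mp (hp.mem_iff.mp hmem)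
      have hhx : h ≤ x := by
        rcases List.mem_cons.mp hx with rfl | hx'
        · exact le_refl x
        · exact (List.pairwise_cons.mp hs).1 x hx'
      omega
    have h2 : -h ≤ m := hmax _ hhm
    exact congrArg some (le_antisymm h1 h2)

lemma loop_rel (k : Int) :
    ∀ (fuel : Nat) (stock : Int) (ds ss heap avail : List Int) (counter : Int),
      heap.Pairwise (· ≤ ·) → avail.Perm (heap.map (fun x => -x)) →
      loopA k fuel stock ds ss heap counter = loopB k fuel stock (ds.zip ss) avail counter := by
  intro fuel
  induction fuel with
  | zero => intros; rfl
  | succ fuel ih =>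
    intro stock ds ss heap avail counter hs hp
    simp only [loopA, loopB]
    by_cases hk : stock < k
    · simp only [if_pos hk]
      obtain ⟨h1, h2, h3⟩ := push_split_rel stock ds ss heap avail hs hp
      cases hh : (pushA stock ds ss heap).2.2 with
      | nil =>
        rw [hh] at h3
        have hav : avail ++ (splitUnlocked stock (ds.zip ss)).1 = [] := by
          have := h3.length_eq
          exact List.eq_nil_of_length_eq_zero (by simpa using this)
        rw [hav]
        simp [PySem.List.max?]
      | cons h t =>
        rw [hh] at h2 h3
        rw [max_of_perm_neg h t _ h2 h3]
        dsimp only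
        have hmem : -h ∈ avail ++ (splitUnlocked stock (ds.zip ss)).1 :=
          h3.mem_iff.mpr (by simp)
        rw [PySem.List.remove?_eq_some_erase _ _ hmem]
        have harith : (stock + -1 * h) = stock + (-h) := by ring
        rw [harith, ← h1]
        exact ih _ _ _ t _ _ (List.pairwise_cons.mp h2).2
          (by
            have := h3.erase (-h)
            simpa [List.map_cons, List.erase_cons_head] using this)
    · simp only [if_neg hk]

-- ===== VERDICT (by name: the statement is the Claim_ definition above) =====
theorem solution_spec : Claim_equal_solution := by
  intro stock dates supplies k _ _
  unfold Spec_solution solution solution_alt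
  exact loop_rel k _ stock dates supplies [] [] 0 List.Pairwise.nil (by simp)
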